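-- pv_equiv track=rewrite | github.com/Krishna-S-27/Elevate_Labs_Projects | AI-Code-Reviewer/backend/tests/test_code2.py | complex_function
-- ===== SOURCE A (Python) =====
-- def complex_function(a, b, c):
--     result = 0
--     for i in range(a):          # Loop 1
--         for j in range(b):      # Loop 2 -> nested loop (complexity)
--             if i % 2 == 0:
--                 if j % 3 == 0:
--                     if c > 10:
--                         result += i*j*c   # Too many nested ifs (complexity)
--     return result
-- ===== SOURCE B (Python) =====
-- def complex_function(a, b, c):
--     # closed form: sum of even i in range(a) times sum of multiples of 3 in range(b), times c
--     if c <= 10: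
--         return 0
--     k = (max(a, 0) + 1) // 2        # count of even i in range(a); their sum is k*(k-1)
--     t = (max(b, 0) + 2) // 3        # count of multiples of 3 in range(b); their sum is 3*t*(t-1)//2
--     return k * (k - 1) * (3 * t * (t - 1) // 2) * c
-- ===== Notes on version B (the rewrite author's own statement) =====
-- stated objective: faster
-- what changed: Replaced the nested O(a*b) double loop by a closed-form product: sum of even i below a times sum of multiples of 3 below b times c, computed with arithmetic-series formulas in O(1).
import Mathlib
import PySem

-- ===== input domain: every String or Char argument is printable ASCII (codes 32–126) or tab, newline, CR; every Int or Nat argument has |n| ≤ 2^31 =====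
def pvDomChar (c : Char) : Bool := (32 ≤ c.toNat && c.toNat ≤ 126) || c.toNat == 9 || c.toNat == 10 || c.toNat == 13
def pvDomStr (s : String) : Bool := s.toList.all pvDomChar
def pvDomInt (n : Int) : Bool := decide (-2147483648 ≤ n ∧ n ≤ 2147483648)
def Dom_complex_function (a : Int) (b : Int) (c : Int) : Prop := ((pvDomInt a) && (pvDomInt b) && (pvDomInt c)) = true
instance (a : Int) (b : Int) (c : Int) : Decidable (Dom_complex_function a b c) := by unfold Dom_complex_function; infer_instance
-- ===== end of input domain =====

-- B replaces A's nested O(a*b) loops by O(1) closed-form arithmetic-series formulas (objective: faster).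

-- ===== PORT A =====
def complex_function (a : Int) (b : Int) (c : Int) : Int :=
  (PySem.List.pyRange 0 a 1).foldl (fun result i =>
    (PySem.List.pyRange 0 b 1).foldl (fun result j =>
      if PySem.Int.mod i 2 = 0 then
        if PySem.Int.mod j 3 = 0 then
          if c > 10 then result + i * j * c else result
        else result
      else result) result) 0

-- ===== PORT B =====
def complex_function_alt (a : Int) (b : Int) (c : Int) : Int :=
  if c ≤ 10 then 0
  else
    let k := PySem.Int.floordiv (max a 0 + 1) 2
    let t := PySem.Int.floordiv (max b 0 + 2) 3
    k * (k - 1) * (PySem.Int.floordiv (3 * t * (t - 1)) 2) * c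

-- ===== PRECONDITION & SPEC =====
def Spec_complex_function (a : Int) (b : Int) (c : Int) (out : Int) : Prop := out = complex_function_alt a b c
instance (a : Int) (b : Int) (c : Int) (out : Int) : Decidable (Spec_complex_function a b c out) := by unfold Spec_complex_function; infer_instance

-- ===== CLAIM (what is proved, stated in full; the proofs are below) =====
def Claim_equal_complex_function : Prop := ∀ (a : Int) (b : Int) (c : Int), Dom_complex_function a b c → Spec_complex_function a b c (complex_function a b c)

-- ===== LEMMAS AND PROOFS =====

-- sum of the multiples of 3 below n
def pvS3 : Nat → Int
  | 0 => 0
  | n + 1 => pvS3 n + (if n % 3 = 0 then (n : Int) else 0)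

-- sum of the even numbers below n
def pvS2 : Nat → Int
  | 0 => 0
  | n + 1 => pvS2 n + (if n % 2 = 0 then (n : Int) else 0)

lemma pvS3_succ (n : Nat) : pvS3 (n + 1) = pvS3 n + (if n % 3 = 0 then (n : Int) else 0) := rfl

lemma pvS2_succ (n : Nat) : pvS2 (n + 1) = pvS2 n + (if n % 2 = 0 then (n : Int) else 0) := rfl

lemma pvS3_closed (n : Nat) :
    2 * pvS3 n = 3 * (((n + 2) / 3 : Nat) : Int) * ((((n + 2) / 3 : Nat) : Int) - 1) := by
  induction n with
  | zero => simp [pvS3]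
  | succ n ih =>
    obtain ⟨q, r, hr, hn⟩ : ∃ q r, r < 3 ∧ n = 3 * q + r :=
      ⟨n / 3, n % 3, Nat.mod_lt _ (by omega), by omega⟩
    subst hn
    rw [pvS3_succ]
    interval_cases r
    · have ht : (((3 * q + 0 + 2) / 3 : Nat) : Int) = q := by omega
      have ht' : (((3 * q + 0 + 1 + 2) / 3 : Nat) : Int) = q + 1 := by omega
      rw [ht] at ih
      rw [ht', if_pos (by omega)]
      push_cast
      linear_combination ih
    · have ht : (((3 * q + 1 + 2) / 3 : Nat) : Int) = q + 1 := by omega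
      have ht' : (((3 * q + 1 + 1 + 2) / 3 : Nat) : Int) = q + 1 := by omega
      rw [ht] at ih
      rw [ht', if_neg (by omega)]
      linear_combination ih
    · have ht : (((3 * q + 2 + 2) / 3 : Nat) : Int) = q + 1 := by omega
      have ht' : (((3 * q + 2 + 1 + 2) / 3 : Nat) : Int) = q + 1 := by omega
      rw [ht] at ih
      rw [ht', if_neg (by omega)]
      linear_combination ih

lemma pvS2_closed (n : Nat) :
    pvS2 n = (((n + 1) / 2 : Nat) : Int) * ((((n + 1) / 2 : Nat) : Int) - 1) := by
  induction n with
  | zero => simp [pvS2]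
  | succ n ih =>
    obtain ⟨q, r, hr, hn⟩ : ∃ q r, r < 2 ∧ n = 2 * q + r :=
      ⟨n / 2, n % 2, Nat.mod_lt _ (by omega), by omega⟩
    subst hn
    rw [pvS2_succ]
    interval_cases r
    · have ht : (((2 * q + 0 + 1) / 2 : Nat) : Int) = q := by omega
      have ht' : (((2 * q + 0 + 1 + 1) / 2 : Nat) : Int) = q + 1 := by omega
      rw [ht] at ih
      rw [ht', if_pos (by omega)]
      push_cast
      linear_combination ih
    · have ht : (((2 * q + 1 + 1) / 2 : Nat) : Int) = q + 1 := by omega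
      have ht' : (((2 * q + 1 + 1 + 1) / 2 : Nat) : Int) = q + 1 := by omega
      rw [ht] at ih
      rw [ht', if_neg (by omega)]
      linear_combination ih

-- any pyRange 0 x 1 is pyRange over the nonnegative part of x
lemma pv_range_toNat (x : Int) :
    PySem.List.pyRange 0 x 1 = PySem.List.pyRange 0 (x.toNat : Int) 1 := by
  rcases le_or_gt x 0 with h | h
  · rw [PySem.List.pyRange_one_eq_nil h, PySem.List.pyRange_one_eq_nil (by omega)]
  · congr 1
    omega

-- inner loop of A: fixed i, j over range(n); adds i*c*(sum of multiples of 3) when i even and c > 10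
lemma pv_inner (i c : Int) (n : Nat) (r : Int) :
    ((PySem.List.pyRange 0 (n : Int) 1).foldl (fun result j =>
      if PySem.Int.mod i 2 = 0 then
        if PySem.Int.mod j 3 = 0 then
          if c > 10 then result + i * j * c else result
        else result
      else result) r)
    = r + (if PySem.Int.mod i 2 = 0 then if c > 10 then i * c * pvS3 n else 0 else 0) := by
  induction n generalizing r with
  | zero =>
    rw [PySem.List.pyRange_one_eq_nil (by omega)]
    simp [pvS3]
  | succ n ih =>
    have hc : ((n + 1 : Nat) : Int) = (n : Int) + 1 := by push_cast; ring
    rw [hc, PySem.List.pyRange_one_succ_right (a := 0) (b := (n : Int)) (by omega), List.foldl_append, ih]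
    have hmod : PySem.Int.mod (n : Int) 3 = 0 ↔ n % 3 = 0 := by
      rw [PySem.Int.mod_eq_emod_of_pos (by omega)]; omega
    simp only [List.foldl_cons, List.foldl_nil, hmod, pvS3_succ]
    split_ifs with h1 h2 h3 <;> ring

-- outer loop of A over range(m)
lemma pv_outer (b c : Int) (m : Nat) (r : Int) :
    ((PySem.List.pyRange 0 (m : Int) 1).foldl (fun result i =>
      (PySem.List.pyRange 0 b 1).foldl (fun result j =>
        if PySem.Int.mod i 2 = 0 then
          if PySem.Int.mod j 3 = 0 then
            if c > 10 then result + i * j * c else result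
          else result
        else result) result) r)
    = r + (if c > 10 then pvS2 m * c * pvS3 b.toNat else 0) := by
  induction m generalizing r with
  | zero =>
    have h0 : PySem.List.pyRange 0 (((0 : Nat) : Int)) 1 = [] :=
      PySem.List.pyRange_one_eq_nil (by omega)
    rw [h0]
    simp [pvS2]
  | succ m ih =>
    have hc : ((m + 1 : Nat) : Int) = (m : Int) + 1 := by push_cast; ring
    rw [hc, PySem.List.pyRange_one_succ_right (a := 0) (b := (m : Int)) (by omega), List.foldl_append, ih]
    have hmod : PySem.Int.mod (m : Int) 2 = 0 ↔ m % 2 = 0 := by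
      rw [PySem.Int.mod_eq_emod_of_pos (by omega)]; omega
    simp only [List.foldl_cons, List.foldl_nil, pv_range_toNat b, pv_inner, hmod, pvS2_succ]
    split_ifs with h1 h2 <;> ring

-- ===== VERDICT (by name: the statement is the Claim_ definition above) =====
theorem complex_function_spec : Claim_equal_complex_function := by
  intro a b c _
  show complex_function a b c = complex_function_alt a b c
  unfold complex_function complex_function_alt
  rw [pv_range_toNat a, pv_outer, zero_add]
  have hk : PySem.Int.floordiv (max a 0 + 1) 2 = (((a.toNat + 1) / 2 : Nat) : Int) := by
    rw [PySem.Int.floordiv_eq_ediv_of_pos (by omega)]; omega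
  have ht : PySem.Int.floordiv (max b 0 + 2) 3 = (((b.toNat + 2) / 3 : Nat) : Int) := by
    rw [PySem.Int.floordiv_eq_ediv_of_pos (by omega)]; omega
  simp only [hk, ht]
  have h3 := pvS3_closed b.toNat
  have h2 := pvS2_closed a.toNat
  have hdiv : PySem.Int.floordiv
      (3 * (((b.toNat + 2) / 3 : Nat) : Int) * ((((b.toNat + 2) / 3 : Nat) : Int) - 1)) 2
      = pvS3 b.toNat := by
    rw [PySem.Int.floordiv_eq_ediv_of_pos (by omega), ← h3,
      Int.mul_ediv_cancel_left _ (by omega)]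
  rw [hdiv, ← h2]
  by_cases hc : c ≤ 10
  · rw [if_pos hc, if_neg (by omega)]
  · rw [if_neg hc, if_pos (by omega)]
    ring
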